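-- pv_equiv track=rewrite | github.com/alexanderwiebe/owl-client-relationship | story-building/update_outline_links.py | inject_click_directives
-- ===== SOURCE A (Python) =====
-- from typing import Dict, Any, List
--
-- def inject_click_directives(lines: List[str], node_click_map: Dict[str, Dict[str, str]]) -> List[str]:
--     if not node_click_map:
--         return lines
--     # Find mermaid code fence boundaries
--     start_idx = None
--     end_idx = None
--     for idx, ln in enumerate(lines):
--         if start_idx is None and ln.strip().startswith('```mermaid'):
--             start_idx = idx
--             continue
--         if start_idx is not None and ln.strip() == '```':
--             end_idx = idx
--             break
--     if start_idx is None or end_idx is None: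
--         return lines  # no mermaid block
--     # Remove existing click lines in block
--     block = lines[start_idx+1:end_idx]
--     filtered_block = [b for b in block if not b.strip().startswith('click ')]
--     # Append new click directives just before the closing fence (after existing content)
--     click_lines = []
--     for node_id in sorted(node_click_map.keys()):
--         info = node_click_map[node_id]
--         title = info['title'].replace('"', "'")
--         url = info['url']
--         click_lines.append(f'    click {node_id} "{url}" "{title}"')
--     # Ensure a blank line before directives for readability
--     if filtered_block and filtered_block[-1].strip() != '':
--         filtered_block.append('')
--     filtered_block.extend(click_lines)
--     new_lines = lines[:start_idx+1] + filtered_block + lines[end_idx:]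
--     return new_lines
-- ===== SOURCE B (Python) =====
-- from typing import Dict, List
--
--
-- def _click_lines(node_click_map: Dict[str, Dict[str, str]]) -> List[str]:
--     return [
--         '    click {} "{}" "{}"'.format(
--             nid,
--             node_click_map[nid]['url'],
--             node_click_map[nid]['title'].replace('"', "'"),
--         )
--         for nid in sorted(node_click_map)
--     ]
--
--
-- def inject_click_directives(lines: List[str], node_click_map: Dict[str, Dict[str, str]]) -> List[str]:
--     if not node_click_map:
--         return lines
--     out: List[str] = []
--     in_block = False
--     done = False
--     last_kept = None
--     for ln in lines:
--         if done:
--             out.append(ln)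
--             continue
--         s = ln.strip()
--         if in_block:
--             if s == '```':
--                 if last_kept is not None and last_kept.strip() != '':
--                     out.append('')
--                 out.extend(_click_lines(node_click_map))
--                 out.append(ln)
--                 in_block = False
--                 done = True
--             elif not s.startswith('click '):
--                 out.append(ln)
--                 last_kept = ln
--         else:
--             out.append(ln)
--             if s.startswith('```mermaid'):
--                 in_block = True
--     if in_block:
--         return lines  # opening fence never closed: leave input unchanged
--     return out
-- ===== Notes on version B (the rewrite author's own statement) =====
-- stated objective: alternative
-- what changed: A finds the fence indices with an enumerate scan and rebuilds the result from three slices plus a filtered copy of the block; B is a single state-machine pass over the lines (before-block / in-block / done) that copies, skips click lines and splices the sorted directives at the closing fence.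
import Mathlib
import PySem

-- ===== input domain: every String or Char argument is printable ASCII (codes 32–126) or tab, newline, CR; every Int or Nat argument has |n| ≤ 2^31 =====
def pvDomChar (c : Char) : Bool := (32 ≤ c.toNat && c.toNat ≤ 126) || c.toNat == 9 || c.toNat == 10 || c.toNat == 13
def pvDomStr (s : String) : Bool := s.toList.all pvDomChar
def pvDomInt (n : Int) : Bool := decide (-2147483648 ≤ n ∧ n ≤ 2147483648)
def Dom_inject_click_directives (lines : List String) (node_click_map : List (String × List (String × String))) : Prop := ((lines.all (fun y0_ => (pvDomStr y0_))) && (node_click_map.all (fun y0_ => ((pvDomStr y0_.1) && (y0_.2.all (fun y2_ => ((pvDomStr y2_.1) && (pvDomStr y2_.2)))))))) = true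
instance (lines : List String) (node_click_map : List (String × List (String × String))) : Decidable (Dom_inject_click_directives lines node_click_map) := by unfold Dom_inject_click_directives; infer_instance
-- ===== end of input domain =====

-- B replaces A's find-the-fence-indices-then-slice-filter-and-reassemble shape by a single
-- state-machine pass over the lines (alternative decomposition; return value only, A mutates nothing).

-- ===== PORT A =====
-- the enumerate loop with its two `if`s, early `break` and carried `start_idx` state
def pvFindFences : List (Int × String) → Option Int → Option Int × Option Int
  | [], st? => (st?, none)
  | (idx, ln) :: rest, none =>
      if PySem.Str.startswith (PySem.Str.strip ln) "```mermaid" then pvFindFences rest (some idx)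
      else pvFindFences rest none
  | (idx, ln) :: rest, some st =>
      if PySem.Str.strip ln == "```" then (some st, some idx)
      else pvFindFences rest (some st)

def inject_click_directives (lines : List String) (node_click_map : List (String × List (String × String))) : List String :=
  if node_click_map = [] then lines
  else
    let fences := pvFindFences (PySem.List.enumerate lines 0) none
    match fences.1, fences.2 with
    | some start_idx, some end_idx =>
      let block := PySem.List.slice lines (some (start_idx + 1)) (some end_idx)
      let filtered_block := block.filter (fun b => !(PySem.Str.startswith (PySem.Str.strip b) "click "))
      let d := PySem.Dict.ofList node_click_map
      let click_lines := (PySem.List.sorted d.keys (fun k => k) false).foldl (fun acc node_id =>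
          let info := PySem.Dict.ofList (PySem.Dict.getD d node_id [])
          let title := PySem.Str.replace (PySem.Dict.getD info "title" "") "\"" "'"
          let url := PySem.Dict.getD info "url" ""
          acc ++ ["    click " ++ node_id ++ " \"" ++ url ++ "\" \"" ++ title ++ "\""]) []
      let filtered_block2 :=
        if !filtered_block.isEmpty && !(PySem.Str.strip (PySem.List.pyGetD filtered_block (-1) "") == "") then
          filtered_block ++ [""]
        else filtered_block
      PySem.List.slice lines none (some (start_idx + 1)) ++ (filtered_block2 ++ click_lines) ++ PySem.List.slice lines (some end_idx) none
    | _, _ => lines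

-- ===== PORT B =====
-- _click_lines: the sorted comprehension of formatted directives
def pvClickLines (node_click_map : List (String × List (String × String))) : List String :=
  let d := PySem.Dict.ofList node_click_map
  (PySem.List.sorted d.keys (fun k => k) false).map (fun nid =>
    let info := PySem.Dict.ofList (PySem.Dict.getD d nid [])
    let title := PySem.Str.replace (PySem.Dict.getD info "title" "") "\"" "'"
    let url := PySem.Dict.getD info "url" ""
    "    click " ++ nid ++ " \"" ++ url ++ "\" \"" ++ title ++ "\"")

-- the single pass: state = (in_block, done, last_kept, out); `none` = fence opened but never closed
def pvAltLoop (m : List (String × List (String × String))) :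
    List String → Bool → Bool → Option String → List String → Option (List String)
  | [], inBlock, _, _, out => if inBlock then none else some out
  | ln :: rest, inBlock, done, lastKept, out =>
    if done then pvAltLoop m rest inBlock done lastKept (out ++ [ln])
    else
      let s := PySem.Str.strip ln
      if inBlock then
        if s == "```" then
          let out2 := if (match lastKept with | some l => !(PySem.Str.strip l == "") | none => false) then out ++ [""] else out
          pvAltLoop m rest false true lastKept (out2 ++ pvClickLines m ++ [ln])
        else if !(PySem.Str.startswith s "click ") then
          pvAltLoop m rest true false (some ln) (out ++ [ln])
        else
          pvAltLoop m rest true false lastKept out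
      else
        if PySem.Str.startswith s "```mermaid" then pvAltLoop m rest true false lastKept (out ++ [ln])
        else pvAltLoop m rest false false lastKept (out ++ [ln])

def inject_click_directives_alt (lines : List String) (node_click_map : List (String × List (String × String))) : List String :=
  if node_click_map = [] then lines
  else
    match pvAltLoop node_click_map lines false false none [] with
    | none => lines
    | some out => out

-- ===== PRECONDITION & SPEC =====
-- helpers for Pre_: first mermaid fence, then first closing fence after it
def pvSplitAtFirst (P : String → Bool) : List String → Option (List String × String × List String)
  | [] => none
  | x :: xs => if P x then some ([], x, xs) else (pvSplitAtFirst P xs).map (fun pr => (x :: pr.1, pr.2.1, pr.2.2))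

def pvIsM (ln : String) : Bool := PySem.Str.startswith (PySem.Str.strip ln) "```mermaid"
def pvIsC (ln : String) : Bool := PySem.Str.strip ln == "```"

def pvHasBlock (lines : List String) : Bool :=
  match pvSplitAtFirst pvIsM lines with
  | none => false
  | some (_, _, rest) => (pvSplitAtFirst pvIsC rest).isSome

-- Pre_ excludes exactly the inputs on which Python A raises KeyError: a complete mermaid block is
-- present, the map is non-empty, and some node's info dict lacks 'title' or 'url'.
def Pre_inject_click_directives (lines : List String) (node_click_map : List (String × List (String × String))) : Prop :=
  node_click_map = [] ∨ pvHasBlock lines = false ∨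
    ∀ kv ∈ (PySem.Dict.ofList node_click_map).items,
      (PySem.Dict.ofList kv.2).contains "title" = true ∧ (PySem.Dict.ofList kv.2).contains "url" = true
instance (lines : List String) (node_click_map : List (String × List (String × String))) : Decidable (Pre_inject_click_directives lines node_click_map) := by unfold Pre_inject_click_directives; infer_instance

def pvWitness_inject_click_directives : List String × (List (String × List (String × String))) :=
  (["```mermaid", "A --> B", "```"], [("A", [("title", "t"), ("url", "u")])])

def Spec_inject_click_directives (lines : List String) (node_click_map : List (String × List (String × String))) (out : List String) : Prop := out = inject_click_directives_alt lines node_click_map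
instance (lines : List String) (node_click_map : List (String × List (String × String))) (out : List String) : Decidable (Spec_inject_click_directives lines node_click_map out) := by unfold Spec_inject_click_directives; infer_instance

-- ===== CLAIM (what is proved, stated in full; the proofs are below) =====
def Claim_equal_inject_click_directives : Prop := ∀ (lines : List String) (node_click_map : List (String × List (String × String))), Dom_inject_click_directives lines node_click_map → Pre_inject_click_directives lines node_click_map → Spec_inject_click_directives lines node_click_map (inject_click_directives lines node_click_map)

-- ===== LEMMAS AND PROOFS =====

lemma pvSplitAtFirst_eq_append {P : String → Bool} {xs a : List String} {b : String} {c : List String}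
    (h : pvSplitAtFirst P xs = some (a, b, c)) : xs = a ++ b :: c := by
  induction xs generalizing a with
  | nil => simp [pvSplitAtFirst] at h
  | cons x xs ih =>
    rw [pvSplitAtFirst] at h
    by_cases hp : P x
    · rw [if_pos hp] at h
      obtain ⟨rfl, rfl, rfl⟩ := Option.some.inj h
      rfl
    · rw [if_neg hp] at h
      cases hsp : pvSplitAtFirst P xs with
      | none => rw [hsp] at h; simp at h
      | some pr =>
        obtain ⟨l, bb, cc⟩ := pr
        rw [hsp] at h
        simp only [Option.map_some, Option.some.injEq, Prod.mk.injEq] at h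
        obtain ⟨h1, h2, h3⟩ := h
        subst h1 h2 h3
        simpa using ih hsp

lemma pvFindFences_some (lines : List String) (k st : Int) :
    pvFindFences (PySem.List.enumerate lines k) (some st) =
      (some st, match pvSplitAtFirst pvIsC lines with
                | none => none
                | some (pre2, _, _) => some (k + pre2.length)) := by
  induction lines generalizing k with
  | nil => simp [PySem.List.enumerate, pvFindFences, pvSplitAtFirst]
  | cons ln rest ih =>
    rw [PySem.List.enumerate_cons, pvFindFences, pvSplitAtFirst]
    by_cases hc : pvIsC ln
    · rw [if_pos hc]
      rw [pvIsC] at hc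
      rw [if_pos hc]
      simp
    · have hc' : ¬(PySem.Str.strip ln == "```") = true := by rw [pvIsC] at hc; exact hc
      rw [if_neg hc', if_neg hc, ih (k + 1)]
      cases hsp : pvSplitAtFirst pvIsC rest with
      | none => simp
      | some pr =>
        obtain ⟨pre2, c, after⟩ := pr
        simp only [Option.map_some]
        simp only [hsp, List.length_cons, Prod.mk.injEq, Option.some.injEq, true_and]
        push_cast
        ring

lemma pvFindFences_none (lines : List String) (k : Int) :
    pvFindFences (PySem.List.enumerate lines k) none =
      match pvSplitAtFirst pvIsM lines with
      | none => (none, none)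
      | some (pre, _, rest) =>
          (some (k + pre.length),
           match pvSplitAtFirst pvIsC rest with
           | none => none
           | some (pre2, _, _) => some (k + pre.length + 1 + pre2.length)) := by
  induction lines generalizing k with
  | nil => simp [PySem.List.enumerate, pvFindFences, pvSplitAtFirst]
  | cons ln rest ih =>
    rw [PySem.List.enumerate_cons, pvFindFences, pvSplitAtFirst]
    by_cases hm : pvIsM ln
    · have hm' : (PySem.Str.startswith (PySem.Str.strip ln) "```mermaid") = true := by
        rw [pvIsM] at hm; exact hm
      rw [if_pos hm', if_pos hm, pvFindFences_some rest (k + 1) k]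
      cases hsp : pvSplitAtFirst pvIsC rest with
      | none => simp [hsp]
      | some pr =>
        obtain ⟨pre2, c, after⟩ := pr
        simp only [hsp, List.length_nil, Prod.mk.injEq, Option.some.injEq]
        constructor <;> (push_cast; ring)
    · have hm' : ¬(PySem.Str.startswith (PySem.Str.strip ln) "```mermaid") = true := by
        rw [pvIsM] at hm; exact hm
      rw [if_neg hm', if_neg hm, ih (k + 1)]
      cases hsp : pvSplitAtFirst pvIsM rest with
      | none => simp [hsp]
      | some pr =>
        obtain ⟨pre, f, rest2⟩ := pr
        simp only [hsp, Option.map_some]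
        cases hsp2 : pvSplitAtFirst pvIsC rest2 with
        | none =>
          simp only [hsp2, List.length_cons, Prod.mk.injEq, Option.some.injEq]
          refine ⟨by push_cast; ring, trivial⟩
        | some pr2 =>
          obtain ⟨pre2, c, after⟩ := pr2
          simp only [hsp2, List.length_cons, Prod.mk.injEq, Option.some.injEq]
          constructor <;> (push_cast; ring)

lemma pvAltLoop_done (m : List (String × List (String × String))) (lines : List String)
    (lk : Option String) (out : List String) :
    pvAltLoop m lines false true lk out = some (out ++ lines) := by
  induction lines generalizing out with
  | nil => simp [pvAltLoop]
  | cons ln rest ih => simp [pvAltLoop, ih]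

lemma pvGetLast?_cons_or {α : Type} (x : α) (l : List α) (o : Option α) :
    (x :: l).getLast?.or o = l.getLast?.or (some x) := by
  induction l generalizing x with
  | nil => rfl
  | cons y t ih => rw [List.getLast?_cons_cons]; cases h : (y :: t).getLast? with
                   | none => simp [List.getLast?_eq_none_iff] at h
                   | some z => rfl

lemma pvAltLoop_block (m : List (String × List (String × String))) (lines : List String)
    (lk : Option String) (out : List String) :
    pvAltLoop m lines true false lk out =
      match pvSplitAtFirst pvIsC lines with
      | none => none
      | some (pre2, c, after) =>
          some (((if (match ((pre2.filter (fun b => !(PySem.Str.startswith (PySem.Str.strip b) "click "))).getLast?.or lk) with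
                     | some l => !(PySem.Str.strip l == "") | none => false) then
                    (out ++ pre2.filter (fun b => !(PySem.Str.startswith (PySem.Str.strip b) "click "))) ++ [""]
                  else out ++ pre2.filter (fun b => !(PySem.Str.startswith (PySem.Str.strip b) "click ")))
                 ++ pvClickLines m ++ [c]) ++ after) := by
  induction lines generalizing lk out with
  | nil => simp [pvAltLoop, pvSplitAtFirst]
  | cons ln rest ih =>
    rw [pvSplitAtFirst]
    simp only [pvAltLoop, Bool.false_eq_true, if_false, if_true]
    by_cases hc : pvIsC ln
    · have hc' : (PySem.Str.strip ln == "```") = true := by rw [pvIsC] at hc; exact hc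
      rw [if_pos hc', if_pos hc, pvAltLoop_done]
      simp
    · have hc' : ¬(PySem.Str.strip ln == "```") = true := by rw [pvIsC] at hc; exact hc
      rw [if_neg hc', if_neg hc]
      by_cases hk : (PySem.Str.startswith (PySem.Str.strip ln) "click ") = true
      · -- click line: skipped
        have hf : (!(PySem.Str.startswith (PySem.Str.strip ln) "click ")) = false := by
          rw [hk]; rfl
        rw [if_neg (by rw [hk]; decide), ih]
        cases hsp : pvSplitAtFirst pvIsC rest with
        | none => rfl
        | some pr =>
          obtain ⟨pre2, c, after⟩ := pr
          simp only [Option.map_some, List.filter_cons, hf, Bool.false_eq_true, if_false]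
      · -- kept line
        have hkf : PySem.Str.startswith (PySem.Str.strip ln) "click " = false := by
          cases h : PySem.Str.startswith (PySem.Str.strip ln) "click " with
          | true => exact absurd h hk
          | false => rfl
        have hf : (!(PySem.Str.startswith (PySem.Str.strip ln) "click ")) = true := by
          rw [hkf]; rfl
        rw [if_pos hf, ih]
        cases hsp : pvSplitAtFirst pvIsC rest with
        | none => rfl
        | some pr =>
          obtain ⟨pre2, c, after⟩ := pr
          simp only [Option.map_some, List.filter_cons, hf, if_true, pvGetLast?_cons_or]
          simp [List.append_assoc]

lemma pvAltLoop_search (m : List (String × List (String × String))) (lines : List String)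
    (lk : Option String) (out : List String) :
    pvAltLoop m lines false false lk out =
      match pvSplitAtFirst pvIsM lines with
      | none => some (out ++ lines)
      | some (pre, f, rest) => pvAltLoop m rest true false lk ((out ++ pre) ++ [f]) := by
  induction lines generalizing out with
  | nil => simp [pvAltLoop, pvSplitAtFirst]
  | cons ln rest ih =>
    rw [pvSplitAtFirst]
    simp only [pvAltLoop, Bool.false_eq_true, if_false]
    by_cases hm : pvIsM ln
    · have hm' : (PySem.Str.startswith (PySem.Str.strip ln) "```mermaid") = true := by
        rw [pvIsM] at hm; exact hm
      rw [if_pos hm', if_pos hm]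
      simp
    · have hm' : ¬(PySem.Str.startswith (PySem.Str.strip ln) "```mermaid") = true := by
        rw [pvIsM] at hm; exact hm
      rw [if_neg hm', if_neg hm, ih]
      cases hsp : pvSplitAtFirst pvIsM rest with
      | none => simp
      | some pr =>
        obtain ⟨pre, f, rest2⟩ := pr
        simp only [Option.map_some]
        simp [List.append_assoc]

lemma pvBlankCond (fb : List String) :
    (match fb.getLast?.or none with | some l => !(PySem.Str.strip l == "") | none => false) =
      (!fb.isEmpty && !(PySem.Str.strip (PySem.List.pyGetD fb (-1) "") == "")) := by
  cases fb with
  | nil => rfl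
  | cons x t =>
    have hne : x :: t ≠ [] := by simp
    rw [List.getLast?_eq_some_getLast hne, PySem.List.pyGetD_neg_one _ _ hne]
    simp

-- ===== VERDICT (by name: the statement is the Claim_ definition above) =====
-- ===== VERDICT (by name: the statement is the Claim_ definition above) =====
theorem inject_click_directives_spec : Claim_equal_inject_click_directives := by
  unfold Claim_equal_inject_click_directives
  intro lines m _ _
  unfold Spec_inject_click_directives
  by_cases hm0 : m = []
  · rw [inject_click_directives, inject_click_directives_alt, if_pos hm0, if_pos hm0]
  · rw [inject_click_directives, inject_click_directives_alt, if_neg hm0, if_neg hm0,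
        pvAltLoop_search]
    cases hs : pvSplitAtFirst pvIsM lines with
    | none =>
      simp only [pvFindFences_none, hs, List.nil_append]
    | some pr =>
      obtain ⟨pre, f, rest⟩ := pr
      simp only [pvAltLoop_block]
      cases hs2 : pvSplitAtFirst pvIsC rest with
      | none =>
        simp only [pvFindFences_none, hs, hs2]
      | some pr2 =>
        obtain ⟨pre2, c, after⟩ := pr2
        simp only [pvFindFences_none, hs, hs2]
        have hrest : rest = pre2 ++ c :: after := pvSplitAtFirst_eq_append hs2
        have hl : lines = (pre ++ [f]) ++ (pre2 ++ c :: after) := by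
          have := pvSplitAtFirst_eq_append hs
          rw [hrest] at this
          simpa using this
        -- the three slices of A
        have e1 : (0 : Int) + (pre.length : Int) + 1 = ((pre.length + 1 : Nat) : Int) := by
          push_cast; ring
        have e2 : (0 : Int) + (pre.length : Int) + 1 + (pre2.length : Int) =
            ((pre.length + 1 + pre2.length : Nat) : Int) := by push_cast; ring
        have hslice1 : PySem.List.slice lines none (some ((0 : Int) + (pre.length : Int) + 1)) = pre ++ [f] := by
          rw [e1, PySem.List.slice_to_natCast, hl, List.take_left' (by simp)]
        have hslice2 : PySem.List.slice lines (some ((0 : Int) + (pre.length : Int) + 1))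
            (some ((0 : Int) + (pre.length : Int) + 1 + (pre2.length : Int))) = pre2 := by
          rw [e2, e1, PySem.List.slice_natCast, hl, List.drop_left' (by simp)]
          have : pre.length + 1 + pre2.length - (pre.length + 1) = pre2.length := by omega
          rw [this, List.take_left' rfl]
        have hslice3 : PySem.List.slice lines
            (some ((0 : Int) + (pre.length : Int) + 1 + (pre2.length : Int))) none = c :: after := by
          have hl2 : lines = ((pre ++ [f]) ++ pre2) ++ (c :: after) := by simp [hl]
          rw [e2, PySem.List.slice_from_natCast, hl2, List.drop_left' (by simp; omega)]
        rw [hslice1, hslice2, hslice3]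
        simp only [pvClickLines, PySem.List.foldl_append_singleton_eq_map, List.nil_append,
          pvBlankCond]
        by_cases hb : (!(pre2.filter (fun b => !(PySem.Str.startswith (PySem.Str.strip b) "click "))).isEmpty &&
            !(PySem.Str.strip (PySem.List.pyGetD (pre2.filter (fun b => !(PySem.Str.startswith (PySem.Str.strip b) "click "))) (-1) "") == "")) = true
        · rw [if_pos hb, if_pos hb]
          simp [List.append_assoc]
        · rw [if_neg hb, if_neg hb]
          simp [List.append_assoc]
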